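-- pv_equiv track=rewrite | github.com/miliar/Code_Jam_Webscraper | solutions_python/Problem_74/248.py | compute
-- ===== SOURCE A (Python) =====
-- def compute( prog ):
-- 	counter = 0
--
-- 	# First is Blue, second is Orange
-- 	pos = { 'B': 1, 'O': 1 }
-- 	free = { 'B': 0, 'O': 0 }
--
-- 	for i in prog:
-- 		time = abs( i[1] - pos[ i[0] ] ) + 1
-- 		time = max( 1, time-free[ i[0] ] )
--
-- 		pos[ i[0] ] = i[1]
--
-- 		for j in free.keys():
-- 			if j != i[0]:
-- 				free[j] = free[j] + time
-- 			else:
-- 				free[j] = 0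
--
-- 		counter = counter + time
--
-- 	return counter
-- ===== SOURCE B (Python) =====
-- def compute(prog):
--     # Pass 1: geometry only -- per-instruction walking distance of the acting robot.
--     pos = {'B': 1, 'O': 1}
--     dists = []
--     for r, target in prog:
--         dists.append((r, abs(target - pos[r])))
--         pos[r] = target
--     # Pass 2: critical-path scheduling -- earliest absolute press times.
--     # A press happens at least one second after the previous press, and at least
--     # d+1 seconds after the same robot's previous press.
--     t = 0
--     done = {'B': 0, 'O': 0}
--     for r, d in dists:
--         t = max(t + 1, done[r] + d + 1)
--         done[r] = t
--     return t
-- ===== Notes on version B (the rewrite author's own statement) =====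
-- stated objective: alternative
-- what changed: B replaces A's incremental delta simulation (per-step elapsed time clamped by a propagated per-robot 'free' credit, updated by an inner loop over both robots) with two staged passes: one pure-geometry pass extracting each instruction's walking distance, then a critical-path scheduling pass assigning each press its earliest absolute time max(prev+1, done[r]+d+1); there is no per-step time delta, no max(1,..) clamp and no free accumulator.
import Mathlib
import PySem

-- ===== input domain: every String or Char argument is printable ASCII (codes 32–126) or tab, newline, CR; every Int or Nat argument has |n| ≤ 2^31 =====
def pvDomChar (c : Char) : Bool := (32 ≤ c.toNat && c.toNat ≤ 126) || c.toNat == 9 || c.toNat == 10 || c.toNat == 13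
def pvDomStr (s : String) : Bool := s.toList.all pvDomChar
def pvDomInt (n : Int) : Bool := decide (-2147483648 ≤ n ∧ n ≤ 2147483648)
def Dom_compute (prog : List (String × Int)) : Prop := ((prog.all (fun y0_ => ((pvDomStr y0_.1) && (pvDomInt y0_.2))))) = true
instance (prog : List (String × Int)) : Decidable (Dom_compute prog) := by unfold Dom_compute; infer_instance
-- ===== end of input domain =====

-- B replaces A's incremental delta simulation (clamped per-step time plus a propagated
-- per-robot 'free' credit) with two staged passes: a geometry pass extracting walking
-- distances, then critical-path scheduling of absolute press times (objective: alternative).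

-- ===== PORT A =====
-- A's dicts pos/free have the fixed key set {"B","O"}; they are ported as explicit pair state
-- (exact under Pre_compute, which excludes the labels on which Python raises KeyError).
-- The inner 'for j in free.keys()' loop is a foldl over the key list ["B","O"].
def computeFreeLoop (r : String) (time : Int) (f : Int × Int) : Int × Int :=
  ["B", "O"].foldl (fun f j =>
    if j ≠ r then
      (if j = "B" then (f.1 + time, f.2) else (f.1, f.2 + time))
    else
      (if j = "B" then ((0 : Int), f.2) else (f.1, (0 : Int)))) f

def computeGo (prog : List (String × Int)) (counter posB posO freeB freeO : Int) : Int :=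
  match prog with
  | [] => counter
  | i :: rest =>
    let p := if i.1 = "B" then posB else posO
    let fr := if i.1 = "B" then freeB else freeO
    let time := |i.2 - p| + 1
    let time := max 1 (time - fr)
    let posB' := if i.1 = "B" then i.2 else posB
    let posO' := if i.1 = "B" then posO else i.2
    let f' := computeFreeLoop i.1 time (freeB, freeO)
    computeGo rest (counter + time) posB' posO' f'.1 f'.2

def compute (prog : List (String × Int)) : Int :=
  computeGo prog 0 1 1 0 0

-- ===== PORT B =====
-- Pass 1 of Source B: per-instruction walking distance of the acting robot (positions as pair).
def computePass1 (prog : List (String × Int)) (posB posO : Int) : List (String × Int) :=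
  match prog with
  | [] => []
  | (r, target) :: rest =>
    (r, |target - (if r = "B" then posB else posO)|) ::
      computePass1 rest (if r = "B" then target else posB) (if r = "B" then posO else target)

-- Pass 2 of Source B: earliest absolute press times (done-times as pair).
def computePass2 (ds : List (String × Int)) (t doneB doneO : Int) : Int :=
  match ds with
  | [] => t
  | (r, d) :: rest =>
    let t' := max (t + 1) ((if r = "B" then doneB else doneO) + d + 1)
    computePass2 rest t' (if r = "B" then t' else doneB) (if r = "B" then doneO else t')

def compute_alt (prog : List (String × Int)) : Int :=
  computePass2 (computePass1 prog 1 1) 0 0 0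

-- ===== PRECONDITION & SPEC =====
-- Pre_ excludes programs containing a robot label other than "B" or "O": on those Python A
-- raises KeyError (and B does too).
def Pre_compute (prog : List (String × Int)) : Prop :=
  (prog.all (fun i => i.1 == "B" || i.1 == "O")) = true
instance (prog : List (String × Int)) : Decidable (Pre_compute prog) := by
  unfold Pre_compute; infer_instance

def pvWitness_compute : (List (String × Int)) := [("B", 5), ("O", 3), ("B", 2)]

def Spec_compute (prog : List (String × Int)) (out : Int) : Prop := out = compute_alt prog
instance (prog : List (String × Int)) (out : Int) : Decidable (Spec_compute prog out) := by
  unfold Spec_compute; infer_instance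

-- ===== CLAIM (what is proved, stated in full; the proofs are below) =====
def Claim_equal_compute : Prop := ∀ (prog : List (String × Int)), Dom_compute prog → Pre_compute prog → Spec_compute prog (compute prog)

-- ===== LEMMAS AND PROOFS =====
-- Invariant linking the two states: A's 'free' credit of a robot is the running total minus
-- that robot's absolute done-time, and A's counter is B's current absolute time.
theorem computeGo_eq_passes (prog : List (String × Int))
    (h : (prog.all (fun i => i.1 == "B" || i.1 == "O")) = true) :
    ∀ (c pB pO dB dO : Int),
      computeGo prog c pB pO (c - dB) (c - dO) =
        computePass2 (computePass1 prog pB pO) c dB dO := by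
  induction prog with
  | nil => intro c pB pO dB dO; rfl
  | cons i rest ih =>
    intro c pB pO dB dO
    simp only [List.all_cons, Bool.and_eq_true, Bool.or_eq_true, beq_iff_eq] at h
    obtain ⟨hi, hrest⟩ := h
    obtain ⟨r, t⟩ := i
    rcases hi with hB | hO
    · subst hB
      simp only [computeGo, computePass1, computePass2, computeFreeLoop, List.foldl]
      simp only [String.reduceEq, ne_eq, not_false_eq_true, not_true, if_true, if_false]
      have hmax : ∀ x : Int, c + max 1 (x + 1 - (c - dB)) = max (c + 1) (dB + x + 1) := by
        intro x; omega
      have := ih hrest (max (c + 1) (dB + |t - pB| + 1)) t pO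
        (max (c + 1) (dB + |t - pB| + 1)) dO
      simp only [sub_self] at this
      rw [show c - dO + max 1 (|t - pB| + 1 - (c - dB)) =
            max (c + 1) (dB + |t - pB| + 1) - dO by
          have := hmax (|t - pB|); omega,
        hmax (|t - pB|)]
      exact this
    · subst hO
      simp only [computeGo, computePass1, computePass2, computeFreeLoop, List.foldl]
      simp only [String.reduceEq, ne_eq, not_false_eq_true, not_true, if_true, if_false]
      have hmax : ∀ x : Int, c + max 1 (x + 1 - (c - dO)) = max (c + 1) (dO + x + 1) := by
        intro x; omega
      have := ih hrest (max (c + 1) (dO + |t - pO| + 1)) pB t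
        dB (max (c + 1) (dO + |t - pO| + 1))
      simp only [sub_self] at this
      rw [show c - dB + max 1 (|t - pO| + 1 - (c - dO)) =
            max (c + 1) (dO + |t - pO| + 1) - dB by
          have := hmax (|t - pO|); omega,
        hmax (|t - pO|)]
      exact this

-- ===== VERDICT (by name: the statement is the Claim_ definition above) =====
theorem compute_spec : Claim_equal_compute := by
  intro prog _ hpre
  unfold Spec_compute compute compute_alt
  have := computeGo_eq_passes prog hpre 0 1 1 0 0
  simpa using this
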